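-- pv_equiv track=rewrite | github.com/RjDrury/COMP-472-A3 | helpers.py | get_filtered_vocabulary
-- ===== SOURCE A (Python) =====
-- def get_filtered_vocabulary(documents_list):
--     present_once = []
--     present_more_than_once = []
--
--     for string in documents_list:
--         for word in string.split():
--             if word not in present_once:
--                 present_once.append(word)
--             elif word not in present_more_than_once:
--                 present_more_than_once.append(word)
--
--     return present_more_than_once
-- ===== SOURCE B (Python) =====
-- def get_filtered_vocabulary(documents_list):
--     tokens = [w for doc in documents_list for w in doc.split()]
--     positions = {}
--     for i, w in enumerate(tokens):
--         positions.setdefault(w, []).append(i)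
--     pairs = sorted(((ps[1], w) for w, ps in positions.items() if len(ps) >= 2),
--                    key=lambda p: p[0])
--     return [w for _, w in pairs]
-- ===== Notes on version B (the rewrite author's own statement) =====
-- stated objective: faster
-- what changed: Replaces A's incremental scan with two linear list-membership tests per token by flattening the tokens, building a word -> occurrence-index table in one dict pass, and sorting the (second-occurrence index, word) pairs to recover the emission order.
import Mathlib
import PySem

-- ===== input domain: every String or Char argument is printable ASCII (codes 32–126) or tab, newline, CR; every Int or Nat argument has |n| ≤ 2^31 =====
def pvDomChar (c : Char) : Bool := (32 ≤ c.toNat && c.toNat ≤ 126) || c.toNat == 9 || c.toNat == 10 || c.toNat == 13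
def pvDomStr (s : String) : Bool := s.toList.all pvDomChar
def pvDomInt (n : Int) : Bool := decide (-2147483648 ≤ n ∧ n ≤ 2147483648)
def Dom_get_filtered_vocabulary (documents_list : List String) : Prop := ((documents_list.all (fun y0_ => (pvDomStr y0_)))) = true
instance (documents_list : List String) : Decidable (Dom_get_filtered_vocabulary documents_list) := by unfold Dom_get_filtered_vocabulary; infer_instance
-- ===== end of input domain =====

-- B replaces A's quadratic membership-scanning emit loop by a position-index table
-- (word -> list of global token indices) plus a sort of (second-occurrence index, word)
-- pairs; objective: faster (a timing run measured B faster on large inputs).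

-- ===== PORT A =====
-- the body of A's inner loop: if word not in present_once … elif word not in present_more_than_once …
def pvStepA (st : List String × List String) (w : String) : List String × List String :=
  if st.1.contains w = false then (st.1 ++ [w], st.2)
  else if st.2.contains w = false then (st.1, st.2 ++ [w])
  else st

def get_filtered_vocabulary (documents_list : List String) : List String :=
  (documents_list.foldl (fun st s => (PySem.Str.split₀ s).foldl pvStepA st)
    (([] : List String), ([] : List String))).2

-- ===== PORT B =====
def get_filtered_vocabulary_alt (documents_list : List String) : List String :=
  let tokens := documents_list.flatMap (fun doc => PySem.Str.split₀ doc)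
  -- positions.setdefault(w, []).append(i) : append i to the entry of w, inserting it on first sight
  let positions := (PySem.List.enumerate tokens 0).foldl
      (fun (d : PySem.Dict String (List Int)) p => d.insert p.2 (d.getD p.2 [] ++ [p.1]))
      PySem.Dict.empty
  -- ps[1] with 2 ≤ len ps is in range, so pyGetD with default 0 is exact here
  let pairs := PySem.List.sorted
      (positions.items.filterMap (fun q =>
        if 2 ≤ q.2.length then some (PySem.List.pyGetD q.2 1 0, q.1) else none))
      (fun p => p.1) false
  pairs.map (fun p => p.2)

-- ===== PRECONDITION & SPEC =====
def Spec_get_filtered_vocabulary (documents_list : List String) (out : List String) : Prop := out = get_filtered_vocabulary_alt documents_list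
instance (documents_list : List String) (out : List String) : Decidable (Spec_get_filtered_vocabulary documents_list out) := by unfold Spec_get_filtered_vocabulary; infer_instance

-- ===== CLAIM (what is proved, stated in full; the proofs are below) =====
def Claim_equal_get_filtered_vocabulary : Prop := ∀ (documents_list : List String), Dom_get_filtered_vocabulary documents_list → Spec_get_filtered_vocabulary documents_list (get_filtered_vocabulary documents_list)

-- ===== LEMMAS AND PROOFS =====

-- positions of w among the tokens, as B's dict records them
def pvPosOf (w : String) (p : List String) : List Int :=
  ((PySem.List.enumerate p 0).filter (fun q => q.2 == w)).map (fun q => q.1)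

-- the index of the second occurrence of w (meaningful when 2 ≤ (pvPosOf w p).length)
def pvSIdx (w : String) (p : List String) : Int := (pvPosOf w p).getD 1 0

lemma pvPosOf_append (w x : String) (p : List String) :
    pvPosOf w (p ++ [x]) = pvPosOf w p ++ (if x == w then [(p.length : Int)] else []) := by
  simp only [pvPosOf, PySem.List.enumerate_append, List.filter_append, List.map_append,
    PySem.List.enumerate_cons, PySem.List.enumerate_nil]
  by_cases h : x == w <;> simp [h]

lemma pvPosOf_length (w : String) (p : List String) :
    (pvPosOf w p).length = p.count w := by
  induction p using List.reverseRecOn with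
  | nil => simp [pvPosOf]
  | append_singleton q x ih =>
      rw [pvPosOf_append]
      by_cases h : x == w
      · have hx : x = w := by simpa using h
        simp [ih, hx, List.count_append]
      · have hx : ¬ (w = x) := by intro he; exact absurd (by simp [he]) h
        simp [h, ih, List.count_append, List.count_singleton]

lemma pvPosOf_bounds (w : String) (p : List String) :
    ∀ i ∈ pvPosOf w p, 0 ≤ i ∧ i < (p.length : Int) := by
  intro i hi
  simp only [pvPosOf, List.mem_map, List.mem_filter] at hi
  obtain ⟨q, ⟨hq, _⟩, rfl⟩ := hi
  rw [PySem.List.mem_enumerate_iff] at hq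
  obtain ⟨k, hk, rfl⟩ := hq
  refine ⟨by simp, ?_⟩
  simp only [Int.zero_add]
  exact_mod_cast hk

lemma pvSIdx_mem (w : String) (p : List String) (h : 2 ≤ (pvPosOf w p).length) :
    pvSIdx w p ∈ pvPosOf w p := by
  unfold pvSIdx
  rw [List.getD_eq_getElem _ _ (by omega)]
  exact List.getElem_mem _

lemma pvSIdx_append_stable (w x : String) (p : List String)
    (h : 2 ≤ (pvPosOf w p).length) : pvSIdx w (p ++ [x]) = pvSIdx w p := by
  unfold pvSIdx
  rw [pvPosOf_append]
  by_cases hx : x == w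
  · simp only [hx, if_pos]
    rw [List.getD_eq_getElem _ _ (by simp; omega), List.getD_eq_getElem _ _ (by omega),
      List.getElem_append_left (by omega)]
  · simp [hx]

lemma pvSIdx_new (x : String) (p : List String) (hc : p.count x = 1) :
    pvSIdx x (p ++ [x]) = (p.length : Int) := by
  have hl : (pvPosOf x p).length = 1 := by rw [pvPosOf_length]; exact hc
  unfold pvSIdx
  rw [pvPosOf_append]
  simp only [BEq.rfl, if_pos]
  rw [List.getD_eq_getElem _ _ (by simp [hl])]
  rw [List.getElem_append_right (by omega)]
  simp [hl]

lemma dedup_append_singleton (M : List String) (x : String) :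
    PySem.List.dedup (M ++ [x]) =
      if x ∈ M then PySem.List.dedup M else PySem.List.dedup M ++ [x] := by
  have hstep : PySem.List.dedup (M ++ [x]) = PySem.Set.add (PySem.List.dedup M) x := by
    simp [PySem.List.dedup_eq_ofList, PySem.Set.ofList, List.foldl_append]
  rw [hstep]
  unfold PySem.Set.add
  by_cases h : x ∈ M
  · simp [h]
  · simp [h]

-- ===== A-side invariant =====

lemma invA (p : List String) :
    (p.foldl pvStepA (([] : List String), ([] : List String))).1 = PySem.List.dedup p ∧
    (∀ w, w ∈ (p.foldl pvStepA (([] : List String), ([] : List String))).2 ↔ 2 ≤ p.count w) ∧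
    (p.foldl pvStepA (([] : List String), ([] : List String))).2.Pairwise
      (fun a b => pvSIdx a p < pvSIdx b p) := by
  induction p using List.reverseRecOn with
  | nil =>
      refine ⟨?_, ?_, ?_⟩
      · simp [PySem.List.dedup_eq_ofList, PySem.Set.ofList, PySem.Set.empty]
      · intro w; simp
      · simp
  | append_singleton q x ih =>
      obtain ⟨ih1, ih2, ih3⟩ := ih
      rw [List.foldl_append, List.foldl_cons, List.foldl_nil]
      set st := q.foldl pvStepA (([] : List String), ([] : List String)) with hst
      have hmem1 : st.1.contains x = true ↔ x ∈ q := by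
        rw [ih1, List.contains_iff_mem, PySem.List.mem_dedup]
      have hcount : ∀ w, (q ++ [x]).count w = q.count w + (if x = w then 1 else 0) := by
        intro w
        by_cases h : x = w <;> simp [List.count_append, h]
      have hstab : ∀ a ∈ st.2, pvSIdx a (q ++ [x]) = pvSIdx a q := by
        intro a ha
        exact pvSIdx_append_stable a x q (by rw [pvPosOf_length]; exact (ih2 a).1 ha)
      have hpair : st.2.Pairwise (fun a b => pvSIdx a (q ++ [x]) < pvSIdx b (q ++ [x])) := by
        refine ih3.imp_of_mem ?_
        intro a b ha hb h
        rw [hstab a ha, hstab b hb]; exact h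
      unfold pvStepA
      by_cases hx : x ∈ q
      · have hc1 : st.1.contains x = true := hmem1.2 hx
        by_cases hx2 : 2 ≤ q.count x
        · -- third or later occurrence: state unchanged
          have hc2 : st.2.contains x = true := by
            rw [List.contains_iff_mem]; exact (ih2 x).2 hx2
          simp only [hc1, hc2, Bool.true_eq_false, if_neg, not_false_iff]
          refine ⟨?_, ?_, hpair⟩
          · rw [dedup_append_singleton, if_pos hx, ih1]
          · intro w
            rw [ih2 w, hcount w]
            by_cases h : x = w
            · subst h; constructor <;> (intro; omega)
            · simp [h]
        · -- exactly the second occurrence: x is appended to the output list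
          have hcx1 : q.count x = 1 := by
            have : 1 ≤ q.count x := List.one_le_count_iff.2 hx
            omega
          have hc2 : st.2.contains x = false := by
            rw [Bool.eq_false_iff]
            intro hcc
            rw [List.contains_iff_mem] at hcc
            exact hx2 ((ih2 x).1 hcc)
          simp only [hc1, hc2, Bool.true_eq_false, if_neg, not_false_iff, if_pos]
          refine ⟨?_, ?_, ?_⟩
          · rw [dedup_append_singleton, if_pos hx, ih1]
          · intro w
            rw [List.mem_append, ih2 w, hcount w]
            by_cases h : x = w
            · subst h; simp [hcx1]
            · simp [h, Ne.symm h]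
          · rw [List.pairwise_append]
            refine ⟨hpair, by simp, ?_⟩
            intro a ha b hb
            have hb' : b = x := by simpa using hb
            rw [hb']
            rw [hstab a ha, pvSIdx_new x q hcx1]
            have h2a : 2 ≤ (pvPosOf a q).length := by
              rw [pvPosOf_length]; exact (ih2 a).1 ha
            exact (pvPosOf_bounds a q _ (pvSIdx_mem a q h2a)).2
      · -- first occurrence: only present_once changes
        have hc1 : st.1.contains x = false := by
          rw [Bool.eq_false_iff]; intro hcc; exact hx (hmem1.1 hcc)
        have hcx0 : q.count x = 0 := List.count_eq_zero.2 hx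
        simp only [hc1, if_pos]
        refine ⟨?_, ?_, hpair⟩
        · rw [dedup_append_singleton, if_neg hx, ih1]
        · intro w
          rw [ih2 w, hcount w]
          by_cases h : x = w
          · subst h; simp [hcx0]
          · simp [h]

-- ===== B-side dict characterization =====

lemma find?_map_keyed (L : List String) (g : String → List Int) (w : String) :
    List.find? (fun q => q.1 == w) (L.map (fun u => (u, g u)))
      = if w ∈ L then some (w, g w) else none := by
  induction L with
  | nil => simp
  | cons u L ih =>
      by_cases h : u = w
      · subst h; simp
      · have : (u == w) = false := by simpa using h
        simp [this, ih, Ne.symm h]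

lemma dictItems (es : List (Int × String)) :
    ((es.foldl (fun (d : PySem.Dict String (List Int)) p =>
        d.insert p.2 (d.getD p.2 [] ++ [p.1])) PySem.Dict.empty)).items
      = (PySem.List.dedup (es.map (fun q => q.2))).map
          (fun w => (w, (es.filter (fun q => q.2 == w)).map (fun q => q.1))) := by
  induction es using List.reverseRecOn with
  | nil => simp [PySem.Dict.empty]
  | append_singleton es p ih =>
      obtain ⟨i, x⟩ := p
      rw [List.foldl_append, List.foldl_cons, List.foldl_nil]
      set M := es.map (fun q : Int × String => q.2) with hM
      set d := es.foldl (fun (d : PySem.Dict String (List Int)) p =>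
        d.insert p.2 (d.getD p.2 [] ++ [p.1])) PySem.Dict.empty with hd
      have hitems : d.items = (PySem.List.dedup M).map
          (fun w => (w, (es.filter (fun q => q.2 == w)).map (fun q => q.1))) := ih
      have hfind : ∀ w, List.find? (fun q => q.1 == w) d.items
          = if w ∈ PySem.List.dedup M then
              some (w, (es.filter (fun q => q.2 == w)).map (fun q => q.1)) else none := by
        intro w; rw [hitems]; exact find?_map_keyed _ _ w
      have hcont : d.contains x = true ↔ x ∈ M := by
        simp only [PySem.Dict.contains, List.any_eq_true]
        constructor
        · rintro ⟨q, hq, hbx⟩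
          rw [hitems] at hq
          simp only [List.mem_map] at hq
          obtain ⟨w, hw, rfl⟩ := hq
          have : w = x := by simpa using hbx
          subst this
          exact (PySem.List.mem_dedup M w).1 hw
        · intro hxM
          refine ⟨(x, (es.filter (fun q => q.2 == x)).map (fun q => q.1)), ?_, by simp⟩
          rw [hitems]
          exact List.mem_map.2 ⟨x, (PySem.List.mem_dedup M x).2 hxM, rfl⟩
      by_cases hx : x ∈ M
      · -- existing key: insert overwrites in place
        have hcontT : d.contains x = true := hcont.2 hx
        have hgd : d.getD x [] = (es.filter (fun q => q.2 == x)).map (fun q => q.1) := by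
          simp only [PySem.Dict.getD, PySem.Dict.get?]
          rw [hfind x, if_pos ((PySem.List.mem_dedup M x).2 hx)]
          rfl
        simp only [PySem.Dict.insert, hcontT, if_pos]
        rw [hgd, hitems]
        rw [List.map_append]
        simp only [List.map_cons, List.map_nil]
        rw [← hM, dedup_append_singleton, if_pos hx, List.map_map]
        apply List.map_congr_left
        intro w hw
        by_cases hwx : w = x
        · subst hwx
          simp [List.filter_append]
        · have hbwx : (w == x) = false := by simpa using hwx
          have hbxw : (x == w) = false := by simpa using Ne.symm hwx
          simp [List.filter_append, hbxw, hwx]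
      · -- new key: appended at the end
        have hcontF : d.contains x = false := by
          rw [Bool.eq_false_iff]; intro hcc; exact hx (hcont.1 hcc)
        have hgd : d.getD x [] = [] := by
          simp only [PySem.Dict.getD, PySem.Dict.get?]
          rw [hfind x, if_neg (fun hc => hx ((PySem.List.mem_dedup M x).1 hc))]
          rfl
        simp only [PySem.Dict.insert, hcontF, Bool.false_eq_true, if_neg, not_false_iff]
        rw [hgd, hitems]
        rw [List.map_append]
        simp only [List.map_cons, List.map_nil]
        rw [← hM, dedup_append_singleton, if_neg hx, List.map_append]
        congr 1
        · apply List.map_congr_left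
          intro w hw
          have hwM : w ∈ M := (PySem.List.mem_dedup M w).1 hw
          have hbxw : (x == w) = false := by
            simp only [beq_eq_false_iff_ne, ne_eq]
            intro he; subst he; exact hx hwM
          simp [List.filter_append, hbxw]
        · have hfilt : es.filter (fun q => q.2 == x) = [] := by
            rw [List.filter_eq_nil_iff]
            intro q hq
            simp only [beq_eq_false_iff_ne, ne_eq, Bool.not_eq_true, beq_eq_false_iff_ne]
            intro he
            exact hx (by rw [hM]; exact List.mem_map.2 ⟨q, hq, he⟩)
          simp [List.filter_append, hfilt]

-- ===== assembling the two sides =====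

lemma mainEq (documents_list : List String) :
    get_filtered_vocabulary documents_list = get_filtered_vocabulary_alt documents_list := by
  have hfuse : ∀ (l : List String) (init : List String × List String),
      l.foldl (fun st s => (PySem.Str.split₀ s).foldl pvStepA st) init
        = (l.flatMap (fun d => PySem.Str.split₀ d)).foldl pvStepA init := by
    intro l
    induction l with
    | nil => intro init; simp
    | cons a l ih => intro init; simp [List.flatMap_cons, List.foldl_append, ih]
  set ts := documents_list.flatMap (fun d => PySem.Str.split₀ d) with hts
  obtain ⟨h1, h2, h3⟩ := invA ts
  set more := (ts.foldl pvStepA (([] : List String), ([] : List String))).2 with hmore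
  -- the A side is the fold over the flattened token list
  have hA : get_filtered_vocabulary documents_list = more := by
    unfold get_filtered_vocabulary
    rw [hfuse]
  -- the B side, rewritten through the dict characterization
  have hB : get_filtered_vocabulary_alt documents_list
      = (PySem.List.sorted
          ((PySem.List.dedup ts).filterMap (fun w =>
            if 2 ≤ (pvPosOf w ts).length then some (pvSIdx w ts, w) else none))
          (fun p => p.1) false).map (fun p => p.2) := by
    unfold get_filtered_vocabulary_alt
    show (List.map (fun p : Int × String => p.2)
      (PySem.List.sorted
        (List.filterMap (fun q : String × List Int =>
            if 2 ≤ q.2.length then some (PySem.List.pyGetD q.2 1 0, q.1) else none)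
          (((PySem.List.enumerate ts 0).foldl
              (fun (d : PySem.Dict String (List Int)) p =>
                d.insert p.2 (d.getD p.2 [] ++ [p.1])) PySem.Dict.empty)).items)
        (fun p => p.1) false)) = _
    rw [dictItems (PySem.List.enumerate ts 0), PySem.List.map_snd_enumerate,
      List.filterMap_map]
    congr 2
    have hFG : ((fun q : String × List Int =>
        if 2 ≤ q.2.length then some (PySem.List.pyGetD q.2 1 0, q.1) else none) ∘
          (fun w => (w, ((PySem.List.enumerate ts 0).filter
            (fun q => q.2 == w)).map (fun q => q.1))))
        = (fun w => if 2 ≤ (pvPosOf w ts).length then some (pvSIdx w ts, w) else none) := by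
      funext w
      by_cases hlen : 2 ≤ (pvPosOf w ts).length
      · have : 2 ≤ (((PySem.List.enumerate ts 0).filter (fun q => q.2 == w)).map
            (fun q => q.1)).length := hlen
        simp only [Function.comp, if_pos this, if_pos hlen]
        have h1lt : (1 : Int) = ((1 : Nat) : Int) := rfl
        rw [PySem.List.pyGetD_ofNat']
        rfl
      · have : ¬ 2 ≤ (((PySem.List.enumerate ts 0).filter (fun q => q.2 == w)).map
            (fun q => q.1)).length := hlen
        simp only [Function.comp, if_neg this, if_neg hlen]
    rw [hFG]
  -- B's pre-sort pair list is a permutation of A's output paired with second indices,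
  -- and A's pairing is strictly increasing in the key, so the sort returns exactly it
  have hndmore : more.Nodup := by
    refine h3.imp ?_
    intro a b hlt he
    rw [he] at hlt
    exact absurd hlt (lt_irrefl _)
  have hndA : (more.map (fun w => (pvSIdx w ts, w))).Nodup := by
    refine List.Nodup.map ?_ hndmore
    intro a b he
    exact congrArg Prod.snd he
  have hndL : ((PySem.List.dedup ts).filterMap (fun w =>
      if 2 ≤ (pvPosOf w ts).length then some (pvSIdx w ts, w) else none)).Nodup := by
    refine List.Nodup.filterMap ?_ (PySem.List.nodup_dedup ts)
    intro a a' b hb hb'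
    by_cases ha : 2 ≤ (pvPosOf a ts).length
    · rw [if_pos ha] at hb
      by_cases ha' : 2 ≤ (pvPosOf a' ts).length
      · rw [if_pos ha'] at hb'
        have e1 : b.2 = a := by rw [← Option.some_inj.1 hb]
        have e2 : b.2 = a' := by rw [← Option.some_inj.1 hb']
        rw [← e1, e2]
      · rw [if_neg ha'] at hb'; cases hb'
    · rw [if_neg ha] at hb; cases hb
  have hmemiff : ∀ pr : Int × String,
      pr ∈ more.map (fun w => (pvSIdx w ts, w)) ↔
      pr ∈ (PySem.List.dedup ts).filterMap (fun w =>
        if 2 ≤ (pvPosOf w ts).length then some (pvSIdx w ts, w) else none) := by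
    intro pr
    rw [List.mem_map, List.mem_filterMap]
    constructor
    · rintro ⟨w, hw, rfl⟩
      have hcnt : 2 ≤ ts.count w := (h2 w).1 hw
      have hlen : 2 ≤ (pvPosOf w ts).length := by rw [pvPosOf_length]; exact hcnt
      refine ⟨w, ?_, by rw [if_pos hlen]⟩
      exact (PySem.List.mem_dedup ts w).2 (List.one_le_count_iff.1 (by omega))
    · rintro ⟨w, hw, hsome⟩
      by_cases hlen : 2 ≤ (pvPosOf w ts).length
      · rw [if_pos hlen] at hsome
        refine ⟨w, (h2 w).2 ?_, Option.some_inj.1 hsome⟩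
        rw [← pvPosOf_length]; exact hlen
      · rw [if_neg hlen] at hsome; cases hsome
  have hperm : (more.map (fun w => (pvSIdx w ts, w))).Perm
      ((PySem.List.dedup ts).filterMap (fun w =>
        if 2 ≤ (pvPosOf w ts).length then some (pvSIdx w ts, w) else none)) :=
    (List.perm_ext_iff_of_nodup hndA hndL).2 hmemiff
  have hpw : (more.map (fun w => (pvSIdx w ts, w))).Pairwise
      (fun a b => a.1 < b.1) := List.pairwise_map.2 h3
  have hsorted := PySem.List.sorted_eq_of_perm_of_pairwise_lt
    ((PySem.List.dedup ts).filterMap (fun w =>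
      if 2 ≤ (pvPosOf w ts).length then some (pvSIdx w ts, w) else none))
    (more.map (fun w => (pvSIdx w ts, w))) (fun p => p.1) hperm hpw
  rw [hA, hB, hsorted, List.map_map]
  simp [Function.comp_def]

-- ===== VERDICT (by name: the statement is the Claim_ definition above) =====
theorem get_filtered_vocabulary_spec : Claim_equal_get_filtered_vocabulary := by
  intro documents_list _
  unfold Spec_get_filtered_vocabulary
  exact mainEq documents_list
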